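-- pv_equiv track=rewrite | github.com/CHACHA0044/CTRI_scrape | ctri_scraper_final.py | _join_wrapped_lines
-- ===== SOURCE A (Python) =====
-- def _join_wrapped_lines(lines):
--     """Join lines that are split across PDF line breaks."""
--     joined = []
--     i = 0
--     while i < len(lines):
--         line = lines[i]
--         if i + 1 < len(lines):
--             nxt = lines[i + 1]
--             if nxt.startswith("(India)") or nxt.startswith("(Global)"):
--                 for prefix in ("Date of First Enrollment ",
--                                "Date of Study Completion ",
--                                "Recruitment Status "):
--                     if line.startswith(prefix):
--                         value_part = line[len(prefix):]
--                         line = prefix + nxt + " " + value_part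
--                         break
--                 else:
--                     line = line + " " + nxt
--                 i += 1
--             elif nxt == "Random Sequence" and "Method of Generating" in line:
--                 val = line.replace("Method of Generating", "").strip()
--                 line = "Method of Generating Random Sequence " + val
--                 i += 1
--             elif line.startswith("Source of Monetary") and nxt == "Material Support":
--                 line = line + " " + nxt
--                 i += 1
--             elif nxt == "(Scientific Query)" or nxt.startswith("(Scientific"):
--                 line = line + " " + nxt
--                 i += 1
--             elif nxt == "(Public Query)" or nxt.startswith("(Public"):
--                 line = line + " " + nxt
--                 i += 1
--         joined.append(line)
--         i += 1
--     return joined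
-- ===== SOURCE B (Python) =====
-- def _merge(prev, nxt):
--     """Return prev joined with continuation line nxt, or None if nxt is not a continuation."""
--     if nxt.startswith("(India)") or nxt.startswith("(Global)"):
--         for prefix in ("Date of First Enrollment ",
--                        "Date of Study Completion ",
--                        "Recruitment Status "):
--             if prev.startswith(prefix):
--                 return prefix + nxt + " " + prev[len(prefix):]
--         return prev + " " + nxt
--     if nxt == "Random Sequence" and "Method of Generating" in prev:
--         return "Method of Generating Random Sequence " + prev.replace("Method of Generating", "").strip()
--     if prev.startswith("Source of Monetary") and nxt == "Material Support":
--         return prev + " " + nxt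
--     if nxt.startswith("(Scientific") or nxt.startswith("(Public"):
--         return prev + " " + nxt
--     return None
--
--
-- def _join_wrapped_lines(lines):
--     """Join lines that are split across PDF line breaks (single forward pass folding into the last emitted line)."""
--     joined = []
--     fresh = False  # last emitted line may still absorb a continuation
--     for cur in lines:
--         merged = _merge(joined[-1], cur) if fresh else None
--         if merged is not None:
--             joined[-1] = merged
--             fresh = False
--         else:
--             joined.append(cur)
--             fresh = True
--     return joined
-- ===== Notes on version B (the rewrite author's own statement) =====
-- stated objective: simpler
-- what changed: Replaces A's index-jumping while loop with lines[i+1] lookahead and i+=2 skips by a single left fold that either folds the current line into the last emitted line (via a _merge helper returning the joined string or None) or emits it fresh, tracking absorbability with a flag.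
import Mathlib
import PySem

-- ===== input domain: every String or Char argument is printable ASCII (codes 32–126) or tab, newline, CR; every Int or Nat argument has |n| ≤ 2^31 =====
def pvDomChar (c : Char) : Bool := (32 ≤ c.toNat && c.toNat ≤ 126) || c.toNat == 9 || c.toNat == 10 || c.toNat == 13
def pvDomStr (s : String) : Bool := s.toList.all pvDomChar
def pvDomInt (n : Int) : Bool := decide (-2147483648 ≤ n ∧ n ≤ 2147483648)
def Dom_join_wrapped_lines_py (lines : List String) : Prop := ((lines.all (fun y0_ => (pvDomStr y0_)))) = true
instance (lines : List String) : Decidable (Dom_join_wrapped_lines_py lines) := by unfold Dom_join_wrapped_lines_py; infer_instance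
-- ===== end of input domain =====

-- B replaces A's index-jumping while loop (lookahead at lines[i+1], i += 2 on a merge) by a single
-- left fold that either folds the current line into the last emitted line or emits it fresh,
-- tracking with a flag whether the last emitted line may still absorb a continuation (objective: simpler decomposition).

-- ===== PORT A =====
-- A's merge decision for the pair (line, nxt): the rewritten line and whether nxt was consumed (i += 2).
def pvStepA (line nxt : String) : String × Bool :=
  if PySem.Str.startswith nxt "(India)" || PySem.Str.startswith nxt "(Global)" then
    -- the for-prefix/else block, unrolled over the three literal prefixes
    (if PySem.Str.startswith line "Date of First Enrollment " then
       "Date of First Enrollment " ++ nxt ++ " " ++ PySem.Str.slice line (some ((PySem.Str.len "Date of First Enrollment " : Int))) none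
     else if PySem.Str.startswith line "Date of Study Completion " then
       "Date of Study Completion " ++ nxt ++ " " ++ PySem.Str.slice line (some ((PySem.Str.len "Date of Study Completion " : Int))) none
     else if PySem.Str.startswith line "Recruitment Status " then
       "Recruitment Status " ++ nxt ++ " " ++ PySem.Str.slice line (some ((PySem.Str.len "Recruitment Status " : Int))) none
     else line ++ " " ++ nxt, true)
  else if nxt == "Random Sequence" && PySem.Str.isIn "Method of Generating" line then
    ("Method of Generating Random Sequence " ++ PySem.Str.strip (PySem.Str.replace line "Method of Generating" ""), true)
  else if PySem.Str.startswith line "Source of Monetary" && nxt == "Material Support" then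
    (line ++ " " ++ nxt, true)
  else if nxt == "(Scientific Query)" || PySem.Str.startswith nxt "(Scientific" then
    (line ++ " " ++ nxt, true)
  else if nxt == "(Public Query)" || PySem.Str.startswith nxt "(Public" then
    (line ++ " " ++ nxt, true)
  else (line, false)

-- A's while loop: i walks the list, consuming one line (append) or two (merge then skip).
def join_wrapped_lines_py : List String → List String
  | [] => []
  | [line] => [line]
  | line :: nxt :: rest =>
      let s := pvStepA line nxt
      if s.2 then s.1 :: join_wrapped_lines_py rest
      else line :: join_wrapped_lines_py (nxt :: rest)

-- ===== PORT B =====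
-- Source B's _merge: the joined line if nxt continues prev, else none.
def pvMerge? (prev nxt : String) : Option String :=
  if PySem.Str.startswith nxt "(India)" || PySem.Str.startswith nxt "(Global)" then
    some (if PySem.Str.startswith prev "Date of First Enrollment " then
       "Date of First Enrollment " ++ nxt ++ " " ++ PySem.Str.slice prev (some ((PySem.Str.len "Date of First Enrollment " : Int))) none
     else if PySem.Str.startswith prev "Date of Study Completion " then
       "Date of Study Completion " ++ nxt ++ " " ++ PySem.Str.slice prev (some ((PySem.Str.len "Date of Study Completion " : Int))) none
     else if PySem.Str.startswith prev "Recruitment Status " then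
       "Recruitment Status " ++ nxt ++ " " ++ PySem.Str.slice prev (some ((PySem.Str.len "Recruitment Status " : Int))) none
     else prev ++ " " ++ nxt)
  else if nxt == "Random Sequence" && PySem.Str.isIn "Method of Generating" prev then
    some ("Method of Generating Random Sequence " ++ PySem.Str.strip (PySem.Str.replace prev "Method of Generating" ""))
  else if PySem.Str.startswith prev "Source of Monetary" && nxt == "Material Support" then
    some (prev ++ " " ++ nxt)
  else if nxt == "(Scientific Query)" || PySem.Str.startswith nxt "(Scientific" then
    some (prev ++ " " ++ nxt)
  else if nxt == "(Public Query)" || PySem.Str.startswith nxt "(Public" then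
    some (prev ++ " " ++ nxt)
  else none

-- Source B's loop body: (joined so far, fresh flag); joined[-1] is getLastD, joined[-1] = m is dropLast ++ [m].
def pvStepB (st : List String × Bool) (cur : String) : List String × Bool :=
  match (if st.2 then pvMerge? (st.1.getLastD "") cur else none) with
  | some m => (st.1.dropLast ++ [m], false)
  | none => (st.1 ++ [cur], true)

def join_wrapped_lines_py_alt (lines : List String) : List String :=
  (lines.foldl pvStepB ([], false)).1

-- ===== PRECONDITION & SPEC =====
def Spec_join_wrapped_lines_py (lines : List String) (out : List String) : Prop := out = join_wrapped_lines_py_alt lines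
instance (lines : List String) (out : List String) : Decidable (Spec_join_wrapped_lines_py lines out) := by unfold Spec_join_wrapped_lines_py; infer_instance

-- ===== CLAIM (what is proved, stated in full; the proofs are below) =====
def Claim_equal_join_wrapped_lines_py : Prop := ∀ (lines : List String), Dom_join_wrapped_lines_py lines → Spec_join_wrapped_lines_py lines (join_wrapped_lines_py lines)

-- ===== LEMMAS AND PROOFS =====

-- B's merge decision agrees with A's: some ↔ consumed, and the same rewritten line.
theorem pvMerge?_eq_stepA (l n : String) :
    pvMerge? l n = (if (pvStepA l n).2 then some (pvStepA l n).1 else none) := by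
  unfold pvMerge? pvStepA
  split_ifs <;> simp_all

-- the combined fold invariant, mutually for fresh = false and fresh = true, by strong induction on length
theorem pvFold_inv (N : Nat) : ∀ (ls : List String), ls.length ≤ N →
    ((∀ acc, (ls.foldl pvStepB (acc, false)).1 = acc ++ join_wrapped_lines_py ls) ∧
     (∀ acc prev, (ls.foldl pvStepB (acc ++ [prev], true)).1 = acc ++ join_wrapped_lines_py (prev :: ls))) := by
  induction N with
  | zero =>
    intro ls hls
    have : ls = [] := List.eq_nil_of_length_eq_zero (Nat.le_zero.mp hls)
    subst this
    exact ⟨fun acc => by simp [join_wrapped_lines_py],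
           fun acc prev => by simp [join_wrapped_lines_py]⟩
  | succ N ih =>
    intro ls hls
    cases ls with
    | nil =>
      exact ⟨fun acc => by simp [join_wrapped_lines_py],
             fun acc prev => by simp [join_wrapped_lines_py]⟩
    | cons cur rest =>
      have hrest : rest.length ≤ N := by simpa using Nat.lt_succ_iff.mp (Nat.lt_of_lt_of_le (by simp) hls)
      constructor
      · intro acc
        have hstep : pvStepB (acc, false) cur = (acc ++ [cur], true) := by
          simp [pvStepB]
        rw [List.foldl_cons, hstep, (ih rest hrest).2 acc cur]
      · intro acc prev
        cases hm : pvMerge? prev cur with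
        | some m =>
          have hstep : pvStepB (acc ++ [prev], true) cur = (acc ++ [m], false) := by
            simp [pvStepB, hm]
          have hA : pvStepA prev cur = (m, true) := by
            have := pvMerge?_eq_stepA prev cur
            rw [hm] at this
            by_cases h2 : (pvStepA prev cur).2
            · simp [h2] at this
              exact Prod.ext this.symm h2
            · simp [h2] at this
          rw [List.foldl_cons, hstep, (ih rest hrest).1 (acc ++ [m])]
          simp [join_wrapped_lines_py, hA]
        | none =>
          have hstep : pvStepB (acc ++ [prev], true) cur = ((acc ++ [prev]) ++ [cur], true) := by
            simp [pvStepB, hm]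
          have hA : (pvStepA prev cur).2 = false := by
            have := pvMerge?_eq_stepA prev cur
            rw [hm] at this
            by_cases h2 : (pvStepA prev cur).2
            · simp [h2] at this
            · exact Bool.eq_false_iff.mpr h2
          rw [List.foldl_cons, hstep, (ih rest hrest).2 (acc ++ [prev]) cur]
          simp [join_wrapped_lines_py, hA]

-- ===== VERDICT (by name: the statement is the Claim_ definition above) =====
theorem join_wrapped_lines_py_spec : Claim_equal_join_wrapped_lines_py := by
  intro lines _
  unfold Spec_join_wrapped_lines_py join_wrapped_lines_py_alt
  have := (pvFold_inv lines.length lines le_rfl).1 []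
  simp at this
  exact this.symm
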